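-- pv_equiv track=rewrite | github.com/15077693d/Attendancv | utils.py | dict_5row_layout
-- ===== SOURCE A (Python) =====
-- def dict_5row_layout(Dict,key,blank = 15,each_row =5,count_value = False):
--     words = ''
--     count = 1
--     for key_,value in Dict.items():
--         item = value[key]
--         if count_value:
--             item = len(value[key])
--         word = str(key_) + '.' + str(item)
--         space_amount = blank - len(word)
--         word += ' '*space_amount
--         words += word
--         if count%each_row == 0:
--             words+='\n'
--         count+=1
--     return words+'\n'
-- ===== SOURCE B (Python) =====
-- def dict_5row_layout(Dict, key, blank=15, each_row=5, count_value=False):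
--     def fmt(k, v):
--         item = len(v[key]) if count_value else v[key]
--         return (str(k) + '.' + str(item)).ljust(blank)
--     words = [fmt(k, v) for k, v in Dict.items()]
--     out = []
--     for i in range(0, len(words), each_row):
--         group = words[i:i + each_row]
--         out.append(''.join(group))
--         if len(group) == each_row:
--             out.append('\n')
--     return ''.join(out) + '\n'
-- ===== Notes on version B (the rewrite author's own statement) =====
-- stated objective: alternative
-- what changed: B replaces A's single interleaved loop with a running row counter by two phases: a map that formats and left-justifies every entry, then a chunking loop over range(0, len(words), each_row) that joins each group and appends a newline after each full group (plus the unconditional trailing newline); Pre_ excludes duplicate keys (the Python dict argument collapses them, making the association-list representation ambiguous), values lacking `key` (A raises KeyError), and each_row <= 0 (A raises ZeroDivisionError at 0 on a non-empty dict; …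
-- outside the precondition, e.g. on dict_5row_layout({'a': {'k': 'x'}}, 'k', 5, -2, False): A returns 'a.x  \n', B returns '\n'; on dict_5row_layout({'a': {'k': 'x'}}, 'k', 5, 0, False): A raises ZeroDivisionError, B raises ValueError; on dict_5row_layout({'a': {}}, 'k', 5, 2, False): A raises KeyError, B raises KeyError
import Mathlib
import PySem

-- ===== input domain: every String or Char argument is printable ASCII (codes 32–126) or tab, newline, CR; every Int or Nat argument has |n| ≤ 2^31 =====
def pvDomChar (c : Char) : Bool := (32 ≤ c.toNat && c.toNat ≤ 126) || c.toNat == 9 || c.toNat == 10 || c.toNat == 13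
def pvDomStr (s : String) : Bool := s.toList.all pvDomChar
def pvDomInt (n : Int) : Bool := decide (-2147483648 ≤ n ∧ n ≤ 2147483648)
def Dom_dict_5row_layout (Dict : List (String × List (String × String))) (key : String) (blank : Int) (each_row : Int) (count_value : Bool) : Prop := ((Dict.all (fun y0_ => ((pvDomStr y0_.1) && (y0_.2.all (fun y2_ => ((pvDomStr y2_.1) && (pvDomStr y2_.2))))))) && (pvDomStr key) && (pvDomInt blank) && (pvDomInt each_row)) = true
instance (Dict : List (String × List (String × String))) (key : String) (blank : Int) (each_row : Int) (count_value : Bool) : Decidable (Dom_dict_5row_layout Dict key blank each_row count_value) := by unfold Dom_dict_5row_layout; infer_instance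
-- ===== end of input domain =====

-- B replaces A's single interleaved loop (running row counter, newline test inside the loop) by two
-- phases: map every entry to its padded word, then join successive groups of each_row words,
-- appending a newline after each full group; same cost, clearer decomposition (objective: alternative).

-- ===== PORT A =====
-- Literal transliteration of A: one fold over the dict entries carrying (words, count);
-- value[key] is ported as Dict lookup (getD, total under Pre_, which demands the key be present),
-- '%': PySem.Int.mod (each_row ≠ 0 under Pre_ when the loop runs), ' '*n is '' for n ≤ 0.
def dict_5row_layout (Dict : List (String × List (String × String))) (key : String) (blank : Int) (each_row : Int) (count_value : Bool) : String :=
  let res := Dict.foldl (fun (st : List Char × Int) kv =>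
      let item : String := (PySem.Dict.mk kv.2).getD key ""
      let itemS : String := if count_value then PySem.Int.toStr (PySem.Str.len item) else item
      let word : List Char := kv.1.toList ++ '.' :: itemS.toList
      let space_amount : Int := blank - (word.length : Int)
      let word : List Char := word ++ List.replicate space_amount.toNat ' '
      let words : List Char := st.1 ++ word
      let words : List Char := if PySem.Int.mod st.2 each_row == 0 then words ++ ['\n'] else words
      (words, st.2 + 1)) ([], 1)
  String.mk (res.1 ++ ['\n'])

-- ===== PORT B =====
-- B's fmt: format one entry and left-justify it to width blank (ljust pads nothing if too wide).
def pvFmtWord (key : String) (blank : Int) (count_value : Bool) (kv : String × List (String × String)) : List Char :=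
  let item : String := (PySem.Dict.mk kv.2).getD key ""
  let itemS : String := if count_value then PySem.Int.toStr (PySem.Str.len item) else item
  let base : List Char := kv.1.toList ++ '.' :: itemS.toList
  base ++ List.replicate (blank - (base.length : Int)).toNat ' '

-- B's loop 'for i in range(0, len(words), each_row)': each step takes the group words[i:i+each_row],
-- emits it, and a '\n' when the group is full. The 'size = 0' arm only makes the recursion total
-- (Python's range raises there; Pre_ admits size = 0 only for the empty list, where the loop is empty).
def pvChunks (size : Nat) (ws : List (List Char)) : List Char :=
  if size = 0 ∨ ws = [] then []
  else
    let group := ws.take size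
    group.flatten ++ (if group.length == size then ['\n'] else []) ++ pvChunks size (ws.drop size)
termination_by ws.length
decreasing_by
  rename_i h
  simp only [not_or] at h
  have : ws ≠ [] := h.2
  have : 0 < ws.length := List.length_pos_iff.mpr this
  simp only [List.length_drop]
  omega

def dict_5row_layout_alt (Dict : List (String × List (String × String))) (key : String) (blank : Int) (each_row : Int) (count_value : Bool) : String :=
  let words := Dict.map (pvFmtWord key blank count_value)
  String.mk (pvChunks each_row.toNat words ++ ['\n'])

-- ===== PRECONDITION & SPEC =====
-- Pre_ excludes: lists with duplicate outer keys or duplicate keys inside a value (the Python dict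
-- argument collapses such entries, so the association-list representation is ambiguous); entries
-- whose value lacks `key` (A raises KeyError); and each_row ≤ 0 — each_row = 0 makes A raise
-- ZeroDivisionError on a non-empty dict, and a non-positive row width is outside the task's natural
-- domain (B's chunking range raises on step 0 and does not iterate on a negative step).
def Pre_dict_5row_layout (Dict : List (String × List (String × String))) (key : String) (blank : Int) (each_row : Int) (count_value : Bool) : Prop :=
  (Dict.map Prod.fst).Nodup ∧
  (∀ p ∈ Dict, (p.2.map Prod.fst).Nodup ∧ (PySem.Dict.mk p.2).contains key = true) ∧
  1 ≤ each_row
instance (Dict : List (String × List (String × String))) (key : String) (blank : Int) (each_row : Int) (count_value : Bool) : Decidable (Pre_dict_5row_layout Dict key blank each_row count_value) := by unfold Pre_dict_5row_layout; infer_instance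

def pvWitness_dict_5row_layout : (List (String × List (String × String))) × String × Int × Int × Bool :=
  ([("a", [("k", "x")]), ("b", [("k", "yy")])], "k", 5, 2, false)

def Spec_dict_5row_layout (Dict : List (String × List (String × String))) (key : String) (blank : Int) (each_row : Int) (count_value : Bool) (out : String) : Prop := out = dict_5row_layout_alt Dict key blank each_row count_value
instance (Dict : List (String × List (String × String))) (key : String) (blank : Int) (each_row : Int) (count_value : Bool) (out : String) : Decidable (Spec_dict_5row_layout Dict key blank each_row count_value out) := by unfold Spec_dict_5row_layout; infer_instance

-- ===== CLAIM (what is proved, stated in full; the proofs are below) =====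
def Claim_equal_dict_5row_layout : Prop := ∀ (Dict : List (String × List (String × String))) (key : String) (blank : Int) (each_row : Int) (count_value : Bool), Dom_dict_5row_layout Dict key blank each_row count_value → Pre_dict_5row_layout Dict key blank each_row count_value → Spec_dict_5row_layout Dict key blank each_row count_value (dict_5row_layout Dict key blank each_row count_value)

-- ===== LEMMAS AND PROOFS =====

-- A's loop, abstracted: words with a '\n' appended after the word whose (1-based) counter c has
-- c % each_row == 0.
def pvInterW (e : Int) : Int → List (List Char) → List Char
  | _, [] => []
  | c, w :: ws => w ++ (if PySem.Int.mod c e == 0 then '\n' :: pvInterW e (c + 1) ws else pvInterW e (c + 1) ws)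

theorem pvFoldA_eq_interW (key : String) (blank each_row : Int) (count_value : Bool)
    (l : List (String × List (String × String))) (acc : List Char) (c : Int) :
    (l.foldl (fun (st : List Char × Int) kv =>
      let item : String := (PySem.Dict.mk kv.2).getD key ""
      let itemS : String := if count_value then PySem.Int.toStr (PySem.Str.len item) else item
      let word : List Char := kv.1.toList ++ '.' :: itemS.toList
      let space_amount : Int := blank - (word.length : Int)
      let word : List Char := word ++ List.replicate space_amount.toNat ' '
      let words : List Char := st.1 ++ word
      let words : List Char := if PySem.Int.mod st.2 each_row == 0 then words ++ ['\n'] else words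
      (words, st.2 + 1)) (acc, c)).1
    = acc ++ pvInterW each_row c (l.map (pvFmtWord key blank count_value)) := by
  induction l generalizing acc c with
  | nil => simp [pvInterW]
  | cons x xs ih =>
      simp only [List.foldl_cons]
      refine (ih _ _).trans ?_
      by_cases h : PySem.Int.mod c each_row == 0 <;>
        simp [h, pvInterW, pvFmtWord, List.append_assoc]

theorem pvMod_add_size (e c : Int) (s : Nat) (hs : (s : Int) = e) (hc : PySem.Int.mod c e = 0) :
    PySem.Int.mod (c + s) e = 0 := by
  rw [PySem.Int.mod_eq_zero_iff_dvd] at hc ⊢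
  exact dvd_add hc (hs ▸ dvd_rfl)

theorem pvMod_add_lt (e c : Int) (s : Nat) (hs : (s : Int) = e) (hc : PySem.Int.mod c e = 0)
    (k : Nat) (hk0 : 0 < k) (hk : k < s) :
    PySem.Int.mod (c + k) e ≠ 0 := by
  rw [PySem.Int.mod_eq_zero_iff_dvd] at hc
  intro h
  rw [PySem.Int.mod_eq_zero_iff_dvd] at h
  have hdk : e ∣ (k : Int) := (dvd_add_right hc).mp h
  have hna : e.natAbs = s := by
    have : e.natAbs = ((s : Int)).natAbs := by rw [hs]
    simpa using this
  have : e.natAbs ∣ k := by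
    have := Int.natAbs_dvd_natAbs.mpr hdk
    simpa using this
  rw [hna] at this
  have := Nat.le_of_dvd hk0 this
  omega

theorem pvInterW_take (e : Int) (ws : List (List Char)) : ∀ (r : Nat) (c : Int),
    0 < r → PySem.Int.mod (c + r) e = 0 →
    (∀ k : Nat, 0 < k → k < r → PySem.Int.mod (c + k) e ≠ 0) →
    pvInterW e (c + 1) ws
      = (ws.take r).flatten
        ++ (if r ≤ ws.length then '\n' :: pvInterW e (c + r + 1) (ws.drop r) else []) := by
  induction ws with
  | nil =>
      intro r c hr _ _
      simp [pvInterW]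
      omega
  | cons w ws ih =>
      intro r c hr hmod hlt
      rcases r with _ | r'
      · omega
      rcases Nat.eq_zero_or_pos r' with hr1 | hr2
      · subst hr1
        have h1 : PySem.Int.mod (c + 1) e = 0 := by
          have : ((1 : Nat) : Int) = 1 := rfl
          simpa using hmod
        simp [pvInterW, h1, Nat.succ_le_succ (Nat.zero_le _)]
      · have h1 : PySem.Int.mod (c + 1) e ≠ 0 := by
          have := hlt 1 (by omega) (by omega)
          simpa using this
        have hmod' : PySem.Int.mod (c + 1 + r') e = 0 := by
          have : c + 1 + (r' : Int) = c + ((r' + 1 : Nat) : Int) := by push_cast; ring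
          rw [this]; exact hmod
        have hlt' : ∀ k : Nat, 0 < k → k < r' → PySem.Int.mod (c + 1 + k) e ≠ 0 := by
          intro k hk0 hk
          have : c + 1 + (k : Int) = c + ((k + 1 : Nat) : Int) := by push_cast; ring
          rw [this]
          exact hlt (k + 1) (by omega) (by omega)
        have := ih r' (c + 1) hr2 hmod' hlt'
        simp only [pvInterW, h1, beq_iff_eq, this, List.take_succ_cons,
          List.flatten_cons, List.drop_succ_cons, List.length_cons]
        have harith : c + 1 + (r' : Int) + 1 = c + ((r' + 1 : Nat) : Int) + 1 := by push_cast; ring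
        rw [harith]
        simp [List.append_assoc]

theorem pvInterW_eq_chunks (e : Int) (s : Nat) (hs : (s : Int) = e) (hs0 : s ≠ 0) :
    ∀ (n : Nat) (ws : List (List Char)) (c : Int),
    ws.length ≤ n → PySem.Int.mod c e = 0 →
    pvInterW e (c + 1) ws = pvChunks s ws := by
  intro n
  induction n with
  | zero =>
      intro ws c hlen _
      have : ws = [] := List.eq_nil_of_length_eq_zero (by omega)
      subst this
      rw [pvChunks]
      simp [pvInterW]
  | succ n ih =>
      intro ws c hlen hc
      rcases eq_or_ne ws [] with rfl | hne
      · rw [pvChunks]; simp [pvInterW]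
      · have hguard : ¬(s = 0 ∨ ws = []) := by
          simp only [not_or]
          exact ⟨hs0, hne⟩
        rw [pvInterW_take e ws s c (Nat.pos_of_ne_zero hs0)
              (pvMod_add_size e c s hs hc) (pvMod_add_lt e c s hs hc)]
        rw [pvChunks, if_neg hguard]
        have htl : (ws.take s).length = min s ws.length := List.length_take
        by_cases hle : s ≤ ws.length
        · have hfull : ((ws.take s).length == s) = true := by
            rw [htl]; simp [Nat.min_eq_left hle]
          have hdrop : (ws.drop s).length ≤ n := by
            have : 0 < ws.length := List.length_pos_iff.mpr hne
            simp only [List.length_drop]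
            omega
          rw [if_pos hle,
              ih (ws.drop s) (c + s) hdrop (pvMod_add_size e c s hs hc)]
          simp [hle, List.append_assoc]
        · have hfull : ((ws.take s).length == s) = false := by
            rw [htl]; simp; omega
          have hnil : ws.drop s = [] := by
            apply List.eq_nil_of_length_eq_zero
            simp only [List.length_drop]
            omega
          rw [if_neg hle, hnil, pvChunks]
          simp
          omega

-- ===== VERDICT (by name: the statement is the Claim_ definition above) =====
theorem dict_5row_layout_spec : Claim_equal_dict_5row_layout := by
  intro Dict key blank each_row count_value _ hpre
  unfold Spec_dict_5row_layout dict_5row_layout dict_5row_layout_alt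
  simp only []
  rw [pvFoldA_eq_interW]
  rcases eq_or_ne Dict [] with rfl | hne
  · rw [pvChunks]
    simp [pvInterW]
  · have he : 1 ≤ each_row := hpre.2.2
    have hs : ((each_row.toNat : Int)) = each_row := Int.toNat_of_nonneg (by omega)
    have hs0 : each_row.toNat ≠ 0 := by omega
    have h0 : PySem.Int.mod 0 each_row = 0 := by
      rw [PySem.Int.mod_eq_zero_iff_dvd]; exact dvd_zero _
    have h1 : pvInterW each_row 1 (Dict.map (pvFmtWord key blank count_value))
        = pvChunks each_row.toNat (Dict.map (pvFmtWord key blank count_value)) := by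
      simpa using pvInterW_eq_chunks each_row each_row.toNat hs hs0
        (Dict.map (pvFmtWord key blank count_value)).length
        (Dict.map (pvFmtWord key blank count_value)) 0 le_rfl h0
    rw [h1]
    simp
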